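-- pv_equiv track=rewrite | github.com/Louis961/Twitch-Auto-Clipper | db-test/dbtest.py | find_repeats
-- ===== SOURCE A (Python) =====
-- def find_repeats(arr, required_number, num_repeats):
--     idx = 0
--     idxArr = []
--     while idx < len(arr):
--         if [required_number]*num_repeats == arr[idx:idx+num_repeats]:
--             idxArr.append(idx)
--             idx += num_repeats
--         else:
--             idx += 1
--     return idxArr
-- ===== SOURCE B (Python) =====
-- def find_repeats(arr, required_number, num_repeats):
--     res = []
--     i = 0
--     n = len(arr)
--     while i < n:
--         if arr[i] == required_number:
--             j = i + 1
--             while j < n and arr[j] == required_number: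
--                 j += 1
--             run = j - i
--             res.extend(i + t * num_repeats for t in range(run // num_repeats))
--             i = j
--         else:
--             i += 1
--     return res
-- ===== Notes on version B (the rewrite author's own statement) =====
-- stated objective: faster
-- what changed: Replaces A's per-index comparison against a freshly built list [required_number]*num_repeats (an O(num_repeats) slice+equality at each position) with a single run-length scan that finds each maximal run of required_number once and emits the run//num_repeats start indices arithmetically.
import Mathlib
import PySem

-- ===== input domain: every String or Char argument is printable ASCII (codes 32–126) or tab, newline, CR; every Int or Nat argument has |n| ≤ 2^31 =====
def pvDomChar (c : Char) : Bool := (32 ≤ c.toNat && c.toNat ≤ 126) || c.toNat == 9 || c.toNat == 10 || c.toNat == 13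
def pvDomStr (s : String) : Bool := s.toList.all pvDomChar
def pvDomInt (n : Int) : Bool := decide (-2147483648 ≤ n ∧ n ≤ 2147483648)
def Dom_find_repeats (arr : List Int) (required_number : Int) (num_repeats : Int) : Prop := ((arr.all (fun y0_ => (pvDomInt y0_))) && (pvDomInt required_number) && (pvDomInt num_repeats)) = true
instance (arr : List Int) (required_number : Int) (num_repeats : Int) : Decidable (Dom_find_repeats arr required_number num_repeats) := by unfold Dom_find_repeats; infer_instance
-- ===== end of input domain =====

-- B replaces A's per-index slice comparison with a single run-length scan (asymptotically faster in a timing run).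

-- ===== PORT A =====
-- A's while loop; the fuel `arr.length` bounds the iterations, which suffices whenever
-- num_repeats ≥ 1 or arr = [] (inside Pre_; outside, the Python loop never terminates).
def pvGoA (arr : List Int) (required_number : Int) (num_repeats : Int) : Nat → Int → List Int
  | 0, _ => []
  | fuel+1, idx =>
    if idx < (arr.length : Int) then
      if PySem.List.pyRepeat [required_number] num_repeats =
          PySem.List.slice arr (some idx) (some (idx + num_repeats)) then
        idx :: pvGoA arr required_number num_repeats fuel (idx + num_repeats)
      else
        pvGoA arr required_number num_repeats fuel (idx + 1)
    else []

def find_repeats (arr : List Int) (required_number : Int) (num_repeats : Int) : List Int :=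
  pvGoA arr required_number num_repeats arr.length 0

-- ===== PORT B =====
-- B's inner `while j < n and arr[j] == required_number: j += 1`; fuel `arr.length` suffices.
def pvRunEnd (arr : List Int) (required_number : Int) : Nat → Int → Int
  | 0, j => j
  | fuel+1, j =>
    if j < (arr.length : Int) ∧ PySem.List.pyGetD arr j 0 = required_number then
      pvRunEnd arr required_number fuel (j + 1)
    else j

-- B's outer while loop (run-length scan); emits `i + t*num_repeats for t in range(run // num_repeats)`.
def pvGoB (arr : List Int) (required_number : Int) (num_repeats : Int) : Nat → Int → List Int
  | 0, _ => []
  | fuel+1, i =>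
    if i < (arr.length : Int) then
      if PySem.List.pyGetD arr i 0 = required_number then
        let j := pvRunEnd arr required_number arr.length (i + 1)
        (PySem.List.pyRange 0 (PySem.Int.floordiv (j - i) num_repeats) 1).map
            (fun t => i + t * num_repeats)
          ++ pvGoB arr required_number num_repeats fuel j
      else
        pvGoB arr required_number num_repeats fuel (i + 1)
    else []

def find_repeats_alt (arr : List Int) (required_number : Int) (num_repeats : Int) : List Int :=
  pvGoB arr required_number num_repeats arr.length 0

-- ===== PRECONDITION & SPEC =====
-- Pre_ excludes exactly the inputs where A's while loop never terminates: a nonempty arr with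
-- num_repeats ≤ 0 (the empty-slice comparison succeeds forever / idx never reaches len(arr)).
def Pre_find_repeats (arr : List Int) (required_number : Int) (num_repeats : Int) : Prop :=
  arr = [] ∨ 1 ≤ num_repeats
instance (arr : List Int) (required_number : Int) (num_repeats : Int) : Decidable (Pre_find_repeats arr required_number num_repeats) := by unfold Pre_find_repeats; infer_instance

def pvWitness_find_repeats : List Int × Int × Int := ([1, 1, 1, 2, 1, 1], 1, 2)

def Spec_find_repeats (arr : List Int) (required_number : Int) (num_repeats : Int) (out : List Int) : Prop := out = find_repeats_alt arr required_number num_repeats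
instance (arr : List Int) (required_number : Int) (num_repeats : Int) (out : List Int) : Decidable (Spec_find_repeats arr required_number num_repeats out) := by unfold Spec_find_repeats; infer_instance

-- ===== CLAIM (what is proved, stated in full; the proofs are below) =====
def Claim_equal_find_repeats : Prop := ∀ (arr : List Int) (required_number : Int) (num_repeats : Int), Dom_find_repeats arr required_number num_repeats → Pre_find_repeats arr required_number num_repeats → Spec_find_repeats arr required_number num_repeats (find_repeats arr required_number num_repeats)

-- ===== LEMMAS AND PROOFS =====

-- length of the leading run of `req` at the front of `l`
def pvLc (req : Int) (l : List Int) : Nat := (l.takeWhile (fun x => x == req)).length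

theorem pvLc_cons (req x : Int) (l : List Int) :
    pvLc req (x :: l) = if x = req then pvLc req l + 1 else 0 := by
  by_cases h : x = req
  · simp [pvLc, List.takeWhile, h]
  · have hb : (x == req) = false := by simp [h]
    simp [pvLc, List.takeWhile, hb, h]

theorem pvLc_le (req : Int) (l : List Int) : pvLc req l ≤ l.length :=
  (List.takeWhile_sublist _).length_le

theorem pvLc_drop (req : Int) : ∀ (m : Nat) (l : List Int), m ≤ pvLc req l →
    pvLc req (l.drop m) = pvLc req l - m := by
  intro m
  induction m with
  | zero => intro l _; simp
  | succ m ih =>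
    intro l hm
    cases l with
    | nil => simp [pvLc] at hm
    | cons x t =>
      rw [pvLc_cons] at hm ⊢
      by_cases hx : x = req
      · rw [if_pos hx] at hm ⊢
        rw [List.drop_succ_cons, ih t (by omega)]
        omega
      · rw [if_neg hx] at hm; omega

theorem pvReplicate_eq_take_iff (req : Int) : ∀ (kt : Nat) (l : List Int),
    (List.replicate kt req = l.take kt) ↔ kt ≤ pvLc req l := by
  intro kt
  induction kt with
  | zero => intro l; simp
  | succ kt ih =>
    intro l
    cases l with
    | nil => simp [pvLc]
    | cons x t =>
      rw [List.replicate_succ, List.take_succ_cons, pvLc_cons]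
      by_cases hx : x = req
      · subst hx
        rw [if_pos rfl]
        constructor
        · intro h
          have := (ih t).mp ((List.cons.injEq _ _ _ _).mp h).2
          omega
        · intro h
          rw [← (ih t).mpr (by omega)]
      · rw [if_neg hx]
        constructor
        · intro h
          exact absurd ((List.cons.injEq _ _ _ _).mp h).1 (fun e => hx e.symm)
        · intro h; omega

-- the A-side slice condition, characterised by the run length (num_repeats ≥ 1, i a Nat position)
theorem pvCondA (arr : List Int) (req k : Int) (hk : 1 ≤ k) (i : Nat) :
    (PySem.List.pyRepeat [req] k = PySem.List.slice arr (some (i : Int)) (some ((i : Int) + k)))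
      ↔ k.toNat ≤ pvLc req (arr.drop i) := by
  have hc : (i : Int) + k = (i : Int) + (k.toNat : Int) := by omega
  rw [PySem.List.pyRepeat_singleton, hc, PySem.List.slice_natCast_add]
  exact pvReplicate_eq_take_iff req k.toNat (arr.drop i)

theorem pvRunEnd_spec (arr : List Int) (req : Int) : ∀ (fuel j : Nat),
    arr.length - j ≤ fuel →
    pvRunEnd arr req fuel (j : Int) = ((j + pvLc req (arr.drop j) : Nat) : Int) := by
  intro fuel
  induction fuel with
  | zero =>
    intro j hj
    have : arr.drop j = [] := List.drop_eq_nil_of_le (by omega)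
    simp [pvRunEnd, this, pvLc]
  | succ fuel ih =>
    intro j hj
    by_cases hjn : j < arr.length
    · have hdrop : arr.drop j = arr[j] :: arr.drop (j + 1) := List.drop_eq_getElem_cons hjn
      rw [pvRunEnd]
      simp only [PySem.List.pyGetD_natCast]
      by_cases hx : arr[j] = req
      · have hget : arr.getD j 0 = req := by simp [List.getD, hjn, hx]
        rw [if_pos ⟨by exact_mod_cast hjn, hget⟩]
        have hcast : ((j : Int) + 1) = ((j + 1 : Nat) : Int) := by push_cast; ring
        rw [hcast, ih (j + 1) (by omega)]
        rw [hdrop, pvLc_cons, if_pos hx]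
        push_cast; ring
      · have hget : arr.getD j 0 = arr[j] := by simp [List.getD, hjn]
        rw [if_neg (by rw [hget]; tauto)]
        rw [hdrop, pvLc_cons, if_neg hx]
        simp
    · have hd : arr.drop j = [] := List.drop_eq_nil_of_le (by omega)
      rw [pvRunEnd]
      rw [if_neg (by intro h; exact hjn (by exact_mod_cast h.1))]
      simp [hd, pvLc]

theorem pvGoA_exit (arr : List Int) (req k : Int) (fuel : Nat) (i : Int)
    (h : (arr.length : Int) ≤ i) : pvGoA arr req k fuel i = [] := by
  cases fuel with
  | zero => rfl
  | succ fuel => rw [pvGoA, if_neg (by omega)]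

theorem pvGoA_mono (arr : List Int) (req k : Int) (hk : 1 ≤ k) : ∀ (f1 f2 i : Nat),
    arr.length - i ≤ f1 → arr.length - i ≤ f2 →
    pvGoA arr req k f1 (i : Int) = pvGoA arr req k f2 (i : Int) := by
  intro f1
  induction f1 with
  | zero =>
    intro f2 i h1 h2
    rw [pvGoA_exit arr req k 0 _ (by omega), pvGoA_exit arr req k f2 _ (by omega)]
  | succ f1 ih =>
    intro f2 i h1 h2
    by_cases hin : i < arr.length
    · have hlt : (i : Int) < (arr.length : Int) := by exact_mod_cast hin
      cases f2 with
      | zero => omega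
      | succ f2 =>
        rw [pvGoA, pvGoA, if_pos hlt, if_pos hlt]
        by_cases hc : PySem.List.pyRepeat [req] k =
            PySem.List.slice arr (some (i : Int)) (some ((i : Int) + k))
        · rw [if_pos hc, if_pos hc]
          have hcast : (i : Int) + k = ((i + k.toNat : Nat) : Int) := by push_cast; omega
          rw [hcast, ih f2 (i + k.toNat) (by omega) (by omega)]
        · rw [if_neg hc, if_neg hc]
          have hcast : (i : Int) + 1 = ((i + 1 : Nat) : Int) := by push_cast; ring
          rw [hcast, ih f2 (i + 1) (by omega) (by omega)]
    · rw [pvGoA_exit arr req k _ _ (by omega), pvGoA_exit arr req k _ _ (by omega)]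

-- stepping through the tail of a run shorter than num_repeats appends nothing
theorem pvGoA_steps (arr : List Int) (req k : Int) (hk : 1 ≤ k) : ∀ (L i fuel : Nat),
    pvLc req (arr.drop i) = L → L < k.toNat → arr.length - i ≤ fuel →
    pvGoA arr req k fuel (i : Int) = pvGoA arr req k arr.length ((i + L : Nat) : Int) := by
  intro L
  induction L with
  | zero =>
    intro i fuel _ _ hf
    simpa using pvGoA_mono arr req k hk fuel arr.length i hf (by omega)
  | succ L ih =>
    intro i fuel hlc hlt hf
    have hin : i < arr.length := by
      by_contra h
      rw [List.drop_eq_nil_of_le (by omega)] at hlc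
      simp [pvLc] at hlc
    cases fuel with
    | zero => omega
    | succ fuel =>
      have hdrop : arr.drop i = arr[i] :: arr.drop (i + 1) := List.drop_eq_getElem_cons hin
      have hx : arr[i] = req ∧ pvLc req (arr.drop (i + 1)) = L := by
        rw [hdrop, pvLc_cons] at hlc
        by_cases hx : arr[i] = req
        · rw [if_pos hx] at hlc; exact ⟨hx, by omega⟩
        · rw [if_neg hx] at hlc; omega
      have hlt' : (i : Int) < (arr.length : Int) := by exact_mod_cast hin
      rw [pvGoA, if_pos hlt']
      rw [if_neg (by rw [pvCondA arr req k hk i, hlc]; omega)]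
      have hcast : (i : Int) + 1 = ((i + 1 : Nat) : Int) := by push_cast; ring
      rw [hcast, ih (i + 1) fuel hx.2 (by omega) (by omega)]
      congr 2
      omega

-- the result of A across one maximal run of length L starting at a Nat position i
theorem pvGoA_run (arr : List Int) (req k : Int) (hk : 1 ≤ k) : ∀ (L i fuel : Nat),
    pvLc req (arr.drop i) = L → arr.length - i ≤ fuel →
    pvGoA arr req k fuel (i : Int) =
      (List.range (L / k.toNat)).map (fun t : Nat => (i : Int) + (t : Int) * k)
        ++ pvGoA arr req k arr.length ((i + L : Nat) : Int) := by
  intro L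
  induction L using Nat.strong_induction_on with
  | _ L ih =>
    intro i fuel hlc hf
    by_cases hlt : L < k.toNat
    · rw [Nat.div_eq_of_lt hlt]
      simpa using pvGoA_steps arr req k hk L i fuel hlc hlt hf
    · -- L ≥ k.toNat ≥ 1: emit i and jump by k
      have hkt : 1 ≤ k.toNat := by omega
      have hin : i < arr.length := by
        have h1 := pvLc_le req (arr.drop i)
        simp only [List.length_drop] at h1
        omega
      cases fuel with
      | zero => omega
      | succ fuel =>
        have hlt' : (i : Int) < (arr.length : Int) := by exact_mod_cast hin
        rw [pvGoA, if_pos hlt']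
        rw [if_pos (by rw [pvCondA arr req k hk i, hlc]; omega)]
        have hlc' : pvLc req (arr.drop (i + k.toNat)) = L - k.toNat := by
          have hdd : arr.drop (i + k.toNat) = (arr.drop i).drop k.toNat := by
            rw [List.drop_drop]
          rw [hdd, pvLc_drop req k.toNat (arr.drop i) (by omega), hlc]
        have hcast : (i : Int) + k = ((i + k.toNat : Nat) : Int) := by push_cast; omega
        rw [hcast, ih (L - k.toNat) (by omega) (i + k.toNat) fuel hlc' (by omega)]
        have hdiv : L / k.toNat = (L - k.toNat) / k.toNat + 1 :=
          Nat.div_eq_sub_div (by omega) (by omega)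
        rw [hdiv, List.range_succ_eq_map, List.map_cons, List.map_map]
        have h2 : ((i + k.toNat + (L - k.toNat) : Nat) : Int) = ((i + L : Nat) : Int) := by
          push_cast; omega
        rw [h2]
        simp only [List.cons_append]
        congr 2
        · push_cast; ring
        · apply List.map_congr_left
          intro t _
          simp only [Function.comp_apply, Nat.succ_eq_add_one]
          push_cast
          have hkk : (k.toNat : Int) = k := by omega
          rw [hkk]
          ring

theorem pvGoB_exit (arr : List Int) (req k : Int) (fuel : Nat) (i : Int)
    (h : (arr.length : Int) ≤ i) : pvGoB arr req k fuel i = [] := by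
  cases fuel with
  | zero => rfl
  | succ fuel => rw [pvGoB, if_neg (by omega)]

theorem pvMain (arr : List Int) (req k : Int) (hk : 1 ≤ k) : ∀ (fb i fa : Nat),
    arr.length - i ≤ fb → arr.length - i ≤ fa →
    pvGoA arr req k fa (i : Int) = pvGoB arr req k fb (i : Int) := by
  intro fb
  induction fb with
  | zero =>
    intro i fa h1 h2
    rw [pvGoB_exit arr req k 0 _ (by omega), pvGoA_exit arr req k fa _ (by omega)]
  | succ fb ih =>
    intro i fa h1 h2
    by_cases hin : i < arr.length
    · have hlt' : (i : Int) < (arr.length : Int) := by exact_mod_cast hin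
      rw [pvGoB, if_pos hlt']
      have hdrop : arr.drop i = arr[i] :: arr.drop (i + 1) := List.drop_eq_getElem_cons hin
      have hget : PySem.List.pyGetD arr (i : Int) 0 = arr[i] := by
        rw [PySem.List.pyGetD_natCast]; simp [List.getD, hin]
      by_cases hx : arr[i] = req
      · rw [if_pos (by rw [hget, hx])]
        -- run length L ≥ 1 at i
        set L := pvLc req (arr.drop i) with hL
        have hL1 : 1 ≤ L := by rw [hL, hdrop, pvLc_cons, if_pos hx]; omega
        have hLle : L ≤ arr.length - i := by
          have h3 := pvLc_le req (arr.drop i)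
          simp only [List.length_drop] at h3
          omega
        -- B's run end is the end of the maximal run
        have hre : pvRunEnd arr req arr.length ((i : Int) + 1) = ((i + L : Nat) : Int) := by
          have hcast : (i : Int) + 1 = ((i + 1 : Nat) : Int) := by push_cast; ring
          rw [hcast, pvRunEnd_spec arr req arr.length (i + 1) (by omega)]
          have hl1 : pvLc req (arr.drop (i + 1)) = L - 1 := by
            rw [hL, hdrop, pvLc_cons, if_pos hx]; omega
          rw [hl1]
          congr 1
          omega
        simp only [hre]
        -- B's floordiv is Nat division of the run length
        have hfd : PySem.Int.floordiv (((i + L : Nat) : Int) - (i : Int)) k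
            = ((L / k.toNat : Nat) : Int) := by
          have hkk : (k.toNat : Int) = k := by omega
          have hLL : (((i + L : Nat) : Int) - (i : Int)) = ((L : Nat) : Int) := by
            push_cast; ring
          rw [hLL, ← hkk, PySem.Int.floordiv_natCast]
          simp
        rw [hfd, PySem.List.pyRange_zero_nat, List.map_map]
        rw [pvGoA_run arr req k hk L i fa hL.symm h2]
        congr 1
        rw [pvGoA_mono arr req k hk arr.length fb (i + L) (by omega) (by omega)]
        exact ih (i + L) fb (by omega) (by omega)
      · rw [if_neg (by rw [hget]; exact hx)]
        have hL0 : pvLc req (arr.drop i) = 0 := by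
          rw [hdrop, pvLc_cons, if_neg hx]
        cases fa with
        | zero => omega
        | succ fa =>
          rw [pvGoA, if_pos hlt']
          rw [if_neg (by rw [pvCondA arr req k hk i, hL0]; omega)]
          have hcast : (i : Int) + 1 = ((i + 1 : Nat) : Int) := by push_cast; ring
          rw [hcast]
          exact ih (i + 1) fa (by omega) (by omega)
    · rw [pvGoA_exit arr req k _ _ (by omega), pvGoB_exit arr req k _ _ (by omega)]

-- ===== VERDICT (by name: the statement is the Claim_ definition above) =====
theorem find_repeats_spec : Claim_equal_find_repeats := by
  intro arr req k _ hpre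
  unfold Spec_find_repeats find_repeats find_repeats_alt
  rcases hpre with h | hk
  · subst h; rfl
  · have := pvMain arr req k hk arr.length 0 arr.length (by omega) (by omega)
    simpa using this
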